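-- pv_equiv track=rewrite | github.com/ryxxi/Python-Programs | classwork/studentgradebook.py | get_grades
-- ===== SOURCE A (Python) =====
-- def get_grades(names, j_scores, py_scores, ds_scores, dt_scores):
--
-- 	largest_j, smallest_j = j_scores[0], j_scores[0]
-- 	largest_py, smallest_py = py_scores[0], py_scores[0]
-- 	largest_ds, smallest_ds = ds_scores[0], ds_scores[0]
-- 	largest_dt, smallest_dt = dt_scores[0], dt_scores[0]
--
-- 	for score in j_scores:
--
-- 		if score > largest_j: largest_j = score
-- 		elif score < smallest_j: smallest_j = score
--
-- 	java_l_index = j_scores.index(largest_j)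
-- 	java_s_index = j_scores.index(smallest_j)
--
-- 	for score in py_scores:
--
-- 		if score > largest_py: largest_py = score
-- 		elif score < smallest_py: smallest_py = score
--
-- 	python_l_index = py_scores.index(largest_py)
-- 	python_s_index = py_scores.index(smallest_py)
--
-- 	for score in ds_scores:
--
-- 		if score > largest_ds: largest_ds = score
-- 		elif score < smallest_ds: smallest_ds = score
--
-- 	ds_l_index = ds_scores.index(largest_ds)
-- 	ds_s_index = ds_scores.index(smallest_ds)
--
-- 	for score in dt_scores:
--
-- 		if score > largest_dt: largest_dt = score
-- 		elif score < smallest_dt: smallest_dt = score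
--
-- 	dt_l_index = dt_scores.index(largest_dt)
-- 	dt_s_index = dt_scores.index(smallest_dt)
--
--
-- 	yield "\n\nName\tJv\tPy\tDS\tDT"
--
-- 	for index in range (0, len(names)):
--
-- 		yield f"\n{names[index]}\t{j_scores[index]}\t{py_scores[index]}\t{ds_scores[index]}\t{dt_scores[index]}"
--
--
-- 	yield f"""
--
--
-- Highest Java Score: {largest_j} | Student: {names[java_l_index]}
-- Lowest Java Score: {smallest_j} | Student: {names[java_s_index]}
--
-- Highest Python Score: {largest_py} | Student: {names[python_l_index]}
-- Lowest Python Score: {smallest_py} | Student: {names[python_s_index]}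
--
-- Highest Data Science Score: {largest_ds} | Student: {names[ds_l_index]}
-- Lowest Data Science Score: {smallest_ds} | Student: {names[ds_s_index]}
--
-- Highest Design Thinking Score: {largest_dt} | Student: {names[dt_l_index]}
-- Lowest Design Thinking Score: {smallest_dt} | Student: {names[dt_s_index]}
--
-- 		"""
-- ===== SOURCE B (Python) =====
-- def _extremes(scores):
--     # decorate-sort-undecorate: lexicographic sorts put the wanted extremes first
--     pairs = [(v, i) for i, v in enumerate(scores)]
--     lo, lo_i = sorted(pairs)[0]
--     hi, hi_i = sorted(pairs, key=lambda p: (-p[0], p[1]))[0]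
--     return hi, hi_i, lo, lo_i
--
--
-- def _block(label, scores, names):
--     hi, hi_i, lo, lo_i = _extremes(scores)
--     return (f"Highest {label} Score: {hi} | Student: {names[hi_i]}"
--             f"\nLowest {label} Score: {lo} | Student: {names[lo_i]}")
--
--
-- def get_grades(names, j_scores, py_scores, ds_scores, dt_scores):
--     yield "\n\nName\tJv\tPy\tDS\tDT"
--     for i, name in enumerate(names):
--         yield f"\n{name}\t{j_scores[i]}\t{py_scores[i]}\t{ds_scores[i]}\t{dt_scores[i]}"
--     yield ("\n\n\n"
--            + _block("Java", j_scores, names) + "\n\n"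
--            + _block("Python", py_scores, names) + "\n\n"
--            + _block("Data Science", ds_scores, names) + "\n\n"
--            + _block("Design Thinking", dt_scores, names) + "\n\n\t\t")
-- ===== Notes on version B (the rewrite author's own statement) =====
-- stated objective: alternative
-- what changed: Replaces A's per-subject max/min scan loop plus two list.index re-scans by decorate-sort-undecorate: each subject's (score, index) pairs are sorted lexicographically (ascending for the minimum, by (-score, index) for the maximum) and both extremes with their first-occurrence indices are read off the heads of the sorted lists.
import Mathlib
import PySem

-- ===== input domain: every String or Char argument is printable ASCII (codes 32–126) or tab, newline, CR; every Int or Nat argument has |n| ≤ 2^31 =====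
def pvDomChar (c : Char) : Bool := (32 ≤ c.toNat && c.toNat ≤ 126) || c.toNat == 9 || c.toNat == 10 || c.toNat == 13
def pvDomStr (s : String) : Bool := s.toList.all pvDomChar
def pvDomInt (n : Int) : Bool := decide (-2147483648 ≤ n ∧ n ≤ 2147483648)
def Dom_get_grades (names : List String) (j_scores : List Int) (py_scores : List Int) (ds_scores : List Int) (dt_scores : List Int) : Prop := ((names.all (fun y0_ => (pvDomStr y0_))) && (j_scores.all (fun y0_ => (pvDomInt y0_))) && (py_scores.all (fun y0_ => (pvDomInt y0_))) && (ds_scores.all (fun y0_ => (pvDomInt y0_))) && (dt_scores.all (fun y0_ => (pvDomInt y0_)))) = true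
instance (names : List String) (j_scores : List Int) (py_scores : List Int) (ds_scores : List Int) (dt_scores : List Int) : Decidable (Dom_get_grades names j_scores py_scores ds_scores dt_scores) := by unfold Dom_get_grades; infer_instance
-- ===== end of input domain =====

-- B replaces A's per-subject max/min loop plus two list.index re-scans by decorate-sort-
-- undecorate: the (score, index) pairs of each subject are sorted lexicographically and the
-- extremes with their first-occurrence indices are read off the heads of the sorted lists.
-- Both functions are generators; the returned list is the sequence of yielded strings.

-- ===== PORT A =====
-- loop body of A's 'for score in …: if score > largest … elif score < smallest …'
def stepA (p : Int × Int) (score : Int) : Int × Int :=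
  if score > p.1 then (score, p.2)
  else if score < p.2 then (p.1, score)
  else p

def get_grades (names : List String) (j_scores : List Int) (py_scores : List Int) (ds_scores : List Int) (dt_scores : List Int) : List String :=
  -- largest_x, smallest_x = x_scores[0], x_scores[0]; then the scan loop (out-of-range default 0: excluded by Pre_)
  let j0 := (PySem.List.pyGet? j_scores 0).getD 0
  let p0 := (PySem.List.pyGet? py_scores 0).getD 0
  let d0 := (PySem.List.pyGet? ds_scores 0).getD 0
  let t0 := (PySem.List.pyGet? dt_scores 0).getD 0
  let lj := j_scores.foldl stepA (j0, j0)
  let lp := py_scores.foldl stepA (p0, p0)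
  let ld := ds_scores.foldl stepA (d0, d0)
  let lt := dt_scores.foldl stepA (t0, t0)
  -- x_scores.index(largest_x) etc. (the value is a member, so index? is some; default 0 excluded by Pre_)
  let java_l_index : Int := ((PySem.List.index? j_scores lj.1).getD 0 : Nat)
  let java_s_index : Int := ((PySem.List.index? j_scores lj.2).getD 0 : Nat)
  let python_l_index : Int := ((PySem.List.index? py_scores lp.1).getD 0 : Nat)
  let python_s_index : Int := ((PySem.List.index? py_scores lp.2).getD 0 : Nat)
  let ds_l_index : Int := ((PySem.List.index? ds_scores ld.1).getD 0 : Nat)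
  let ds_s_index : Int := ((PySem.List.index? ds_scores ld.2).getD 0 : Nat)
  let dt_l_index : Int := ((PySem.List.index? dt_scores lt.1).getD 0 : Nat)
  let dt_s_index : Int := ((PySem.List.index? dt_scores lt.2).getD 0 : Nat)
  "\n\nName\tJv\tPy\tDS\tDT" ::
  ((PySem.List.pyRange 0 (PySem.List.len names) 1).map (fun index =>
      "\n" ++ PySem.List.pyGetD names index "" ++ "\t"
           ++ PySem.Int.toStr (PySem.List.pyGetD j_scores index 0) ++ "\t"
           ++ PySem.Int.toStr (PySem.List.pyGetD py_scores index 0) ++ "\t"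
           ++ PySem.Int.toStr (PySem.List.pyGetD ds_scores index 0) ++ "\t"
           ++ PySem.Int.toStr (PySem.List.pyGetD dt_scores index 0))) ++
  ["\n\n\nHighest Java Score: " ++ PySem.Int.toStr lj.1 ++ " | Student: " ++ PySem.List.pyGetD names java_l_index "" ++
   "\nLowest Java Score: " ++ PySem.Int.toStr lj.2 ++ " | Student: " ++ PySem.List.pyGetD names java_s_index "" ++
   "\n\nHighest Python Score: " ++ PySem.Int.toStr lp.1 ++ " | Student: " ++ PySem.List.pyGetD names python_l_index "" ++
   "\nLowest Python Score: " ++ PySem.Int.toStr lp.2 ++ " | Student: " ++ PySem.List.pyGetD names python_s_index "" ++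
   "\n\nHighest Data Science Score: " ++ PySem.Int.toStr ld.1 ++ " | Student: " ++ PySem.List.pyGetD names ds_l_index "" ++
   "\nLowest Data Science Score: " ++ PySem.Int.toStr ld.2 ++ " | Student: " ++ PySem.List.pyGetD names ds_s_index "" ++
   "\n\nHighest Design Thinking Score: " ++ PySem.Int.toStr lt.1 ++ " | Student: " ++ PySem.List.pyGetD names dt_l_index "" ++
   "\nLowest Design Thinking Score: " ++ PySem.Int.toStr lt.2 ++ " | Student: " ++ PySem.List.pyGetD names dt_s_index "" ++
   "\n\n\t\t"]

-- ===== PORT B =====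
-- pairs = [(v, i) for i, v in enumerate(scores)]
def pairsB (scores : List Int) : List (Int × Int) :=
  (PySem.List.enumerate scores 0).map (fun p => (p.2, p.1))

-- _extremes: two lexicographic sorts; Python's tuple comparison is the Lex order on Int × Int,
-- so sorted(pairs) / sorted(pairs, key=lambda p: (-p[0], p[1])) are PySem.List.sorted with a
-- toLex key (exact: both sorts compare tuples lexicographically). '[0]' on an empty sorted
-- list raises in Python (excluded by Pre_); default (0, 0) here.
def extremesB (scores : List Int) : Int × Int × Int × Int :=
  let pairs := pairsB scores
  let lo := (PySem.List.pyGet? (PySem.List.sorted pairs (fun p => (toLex p : Lex (Int × Int))) false) 0).getD (0, 0)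
  let hi := (PySem.List.pyGet? (PySem.List.sorted pairs (fun p => (toLex (-p.1, p.2) : Lex (Int × Int))) false) 0).getD (0, 0)
  (hi.1, hi.2, lo.1, lo.2)

-- _block
def blockB (label : String) (scores : List Int) (names : List String) : String :=
  let r := extremesB scores
  "Highest " ++ label ++ " Score: " ++ PySem.Int.toStr r.1 ++ " | Student: " ++ PySem.List.pyGetD names r.2.1 "" ++
  "\nLowest " ++ label ++ " Score: " ++ PySem.Int.toStr r.2.2.1 ++ " | Student: " ++ PySem.List.pyGetD names r.2.2.2 ""

def get_grades_alt (names : List String) (j_scores : List Int) (py_scores : List Int) (ds_scores : List Int) (dt_scores : List Int) : List String :=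
  "\n\nName\tJv\tPy\tDS\tDT" ::
  ((PySem.List.enumerate names 0).map (fun p =>
      "\n" ++ p.2 ++ "\t"
           ++ PySem.Int.toStr (PySem.List.pyGetD j_scores p.1 0) ++ "\t"
           ++ PySem.Int.toStr (PySem.List.pyGetD py_scores p.1 0) ++ "\t"
           ++ PySem.Int.toStr (PySem.List.pyGetD ds_scores p.1 0) ++ "\t"
           ++ PySem.Int.toStr (PySem.List.pyGetD dt_scores p.1 0))) ++
  ["\n\n\n" ++ blockB "Java" j_scores names ++ "\n\n"
             ++ blockB "Python" py_scores names ++ "\n\n"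
             ++ blockB "Data Science" ds_scores names ++ "\n\n"
             ++ blockB "Design Thinking" dt_scores names ++ "\n\n\t\t"]

-- ===== PRECONDITION & SPEC =====
-- One subject column is usable iff it is nonempty, long enough for the name rows, and its
-- first maximum/minimum occur among the first names.length entries (else names[idx] raises).
def okCol (n : Nat) (xs : List Int) : Prop :=
  xs ≠ [] ∧ n ≤ xs.length ∧ (xs.take n).max? = xs.max? ∧ (xs.take n).min? = xs.min?

-- Exactly the inputs on which the Python A returns (outside it A raises IndexError).
def Pre_get_grades (names : List String) (j_scores : List Int) (py_scores : List Int) (ds_scores : List Int) (dt_scores : List Int) : Prop :=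
  names ≠ [] ∧ okCol names.length j_scores ∧ okCol names.length py_scores ∧
  okCol names.length ds_scores ∧ okCol names.length dt_scores

instance (names : List String) (j_scores : List Int) (py_scores : List Int) (ds_scores : List Int) (dt_scores : List Int) : Decidable (Pre_get_grades names j_scores py_scores ds_scores dt_scores) := by unfold Pre_get_grades okCol; infer_instance

def pvWitness_get_grades : List String × List Int × List Int × List Int × List Int :=
  (["Ann", "Bob"], [3, 1], [2, 4], [5, 5], [0, -1])

def Spec_get_grades (names : List String) (j_scores : List Int) (py_scores : List Int) (ds_scores : List Int) (dt_scores : List Int) (out : List String) : Prop := out = get_grades_alt names j_scores py_scores ds_scores dt_scores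
instance (names : List String) (j_scores : List Int) (py_scores : List Int) (ds_scores : List Int) (dt_scores : List Int) (out : List String) : Decidable (Spec_get_grades names j_scores py_scores ds_scores dt_scores out) := by unfold Spec_get_grades; infer_instance

-- ===== CLAIM (what is proved, stated in full; the proofs are below) =====
def Claim_equal_get_grades : Prop := ∀ (names : List String) (j_scores : List Int) (py_scores : List Int) (ds_scores : List Int) (dt_scores : List Int), Dom_get_grades names j_scores py_scores ds_scores dt_scores → Pre_get_grades names j_scores py_scores ds_scores dt_scores → Spec_get_grades names j_scores py_scores ds_scores dt_scores (get_grades names j_scores py_scores ds_scores dt_scores)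

-- ===== LEMMAS AND PROOFS =====

-- reference values: max / min of a nonempty list, as A's loop computes them
def Mf : List Int → Int
  | [] => 0
  | x :: t => t.foldl max x

def mf : List Int → Int
  | [] => 0
  | x :: t => t.foldl min x

-- first index of the max / min, as A's .index computes them
def iH (xs : List Int) : Nat := (PySem.List.index? xs (Mf xs)).getD 0
def iL (xs : List Int) : Nat := (PySem.List.index? xs (mf xs)).getD 0

theorem foldA_eq (t : List Int) : ∀ l s : Int, s ≤ l →
    t.foldl stepA (l, s) = (t.foldl max l, t.foldl min s) := by
  induction t with
  | nil => intro l s _; rfl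
  | cons v t ih =>
    intro l s hsl
    simp only [List.foldl_cons, stepA]
    split_ifs with h1 h2
    · rw [show max l v = v by omega, show min s v = s by omega]
      exact ih v s (by omega)
    · rw [show max l v = l by omega, show min s v = v by omega]
      exact ih l v (by omega)
    · rw [show max l v = l by omega, show min s v = s by omega]
      exact ih l s hsl

theorem foldA_spec (xs : List Int) :
    xs.foldl stepA ((PySem.List.pyGet? xs 0).getD 0, (PySem.List.pyGet? xs 0).getD 0)
      = (Mf xs, mf xs) := by
  cases xs with
  | nil => rfl
  | cons x t =>
    rw [PySem.List.pyGet?_zero_cons]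
    simp only [Option.getD_some, List.foldl_cons]
    have h0 : stepA (x, x) x = (x, x) := by simp [stepA]
    rw [h0, foldA_eq t x x le_rfl, Mf, mf]

theorem mem_le_Mf {xs : List Int} (h : xs ≠ []) : ∀ y ∈ xs, y ≤ Mf xs := by
  cases xs with
  | nil => exact absurd rfl h
  | cons x t =>
    intro y hy
    rcases List.mem_cons.mp hy with rfl | hyt
    · exact (PySem.List.le_foldl_max t y).1
    · exact (PySem.List.le_foldl_max t x).2 y hyt

theorem mf_le_mem {xs : List Int} (h : xs ≠ []) : ∀ y ∈ xs, mf xs ≤ y := by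
  cases xs with
  | nil => exact absurd rfl h
  | cons x t =>
    intro y hy
    rcases List.mem_cons.mp hy with rfl | hyt
    · exact (PySem.List.foldl_min_le t y).1
    · exact (PySem.List.foldl_min_le t x).2 y hyt

theorem Mf_mem {xs : List Int} (h : xs ≠ []) : Mf xs ∈ xs := by
  cases xs with
  | nil => exact absurd rfl h
  | cons x t =>
    rcases PySem.List.foldl_max_mem t x with h1 | h1
    · rw [Mf, h1]; exact List.mem_cons_self
    · exact List.mem_cons_of_mem x (by rw [Mf]; exact h1)

theorem mf_mem {xs : List Int} (h : xs ≠ []) : mf xs ∈ xs := by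
  cases xs with
  | nil => exact absurd rfl h
  | cons x t =>
    rcases PySem.List.foldl_min_mem t x with h1 | h1
    · rw [mf, h1]; exact List.mem_cons_self
    · exact List.mem_cons_of_mem x (by rw [mf]; exact h1)

-- membership in pairsB
theorem pair_mem_pairsB {xs : List Int} {k : Nat} (hk : k < xs.length) :
    (xs[k], (k : Int)) ∈ pairsB xs := by
  have h1 : ((0 : Int) + k, xs[k]) ∈ PySem.List.enumerate xs 0 :=
    (PySem.List.mem_enumerate_iff xs 0 _).mpr ⟨k, hk, rfl⟩
  simp only [pairsB, List.mem_map]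
  exact ⟨((0 : Int) + k, xs[k]), h1, by simp⟩

theorem mem_pairsB_elim {xs : List Int} {p : Int × Int} (hp : p ∈ pairsB xs) :
    ∃ (k : Nat) (hk : k < xs.length), p = (xs[k], (k : Int)) := by
  simp only [pairsB, List.mem_map] at hp
  obtain ⟨q, hq, rfl⟩ := hp
  obtain ⟨k, hk, rfl⟩ := (PySem.List.mem_enumerate_iff xs 0 q).mp hq
  exact ⟨k, hk, by simp⟩

-- head of a lexicographically sorted list = the unique lex-least element
theorem headD_sorted_eq_min {α κ : Type} [LinearOrder κ] {xs : List α} {key : α → κ}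
    (hinj : Function.Injective key) {m : α} (d : α) (hm : m ∈ xs)
    (hmin : ∀ p ∈ xs, key m ≤ key p) :
    (PySem.List.pyGet? (PySem.List.sorted xs key false) 0).getD d = m := by
  cases hs : PySem.List.sorted xs key false with
  | nil =>
    have : xs = [] := (PySem.List.sorted_eq_nil_iff xs key false).mp hs
    subst this; exact absurd hm (List.not_mem_nil)
  | cons h t =>
    rw [PySem.List.pyGet?_zero_cons, Option.getD_some]
    have hh : h ∈ xs := (PySem.List.mem_sorted xs key false h).mp (hs ▸ List.mem_cons_self)
    have h1 : key h ≤ key m := PySem.List.key_head_sorted_le xs key hs m hm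
    exact hinj (le_antisymm h1 (hmin h hh))

theorem negKey_injective : Function.Injective (fun p : Int × Int => (toLex (-p.1, p.2) : Lex (Int × Int))) := by
  intro a b hab
  have h := (Equiv.injective toLex) hab
  simp only [Prod.mk.injEq, neg_inj] at h
  exact Prod.ext h.1 h.2

set_option maxHeartbeats 1000000 in
theorem extremesB_spec (xs : List Int) (hne : xs ≠ []) :
    extremesB xs = (Mf xs, (iH xs : Int), mf xs, (iL xs : Int)) := by
  obtain ⟨kH, hkH⟩ := Option.isSome_iff_exists.mp
    ((PySem.List.index?_isSome_iff xs (Mf xs)).mpr (Mf_mem hne))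
  obtain ⟨hHlt, hHval, hHmin⟩ := PySem.List.getElem_of_index?_eq_some hkH
  obtain ⟨kL, hkL⟩ := Option.isSome_iff_exists.mp
    ((PySem.List.index?_isSome_iff xs (mf xs)).mpr (mf_mem hne))
  obtain ⟨hLlt, hLval, hLmin⟩ := PySem.List.getElem_of_index?_eq_some hkL
  have hiH : iH xs = kH := by simp only [iH, hkH, Option.getD_some]
  have hiL : iL xs = kL := by simp only [iL, hkL, Option.getD_some]
  have hlo : (PySem.List.pyGet? (PySem.List.sorted (pairsB xs)
      (fun p => (toLex p : Lex (Int × Int))) false) 0).getD (0, 0) = (xs[kL], (kL : Int)) := by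
    apply headD_sorted_eq_min (Equiv.injective toLex) (0, 0) (pair_mem_pairsB hLlt)
    intro p hp
    obtain ⟨k, hk, rfl⟩ := mem_pairsB_elim hp
    rw [Prod.Lex.toLex_le_toLex]
    have h1 : mf xs ≤ xs[k] := mf_le_mem hne _ (List.getElem_mem hk)
    rcases eq_or_lt_of_le h1 with heq | hlt
    · refine Or.inr ⟨by rw [hLval, heq], ?_⟩
      have hkk : kL ≤ k := by
        by_contra hc
        exact hLmin k (by omega) heq.symm
      simpa using hkk
    · exact Or.inl (by simpa [hLval] using hlt)
  have hhi : (PySem.List.pyGet? (PySem.List.sorted (pairsB xs)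
      (fun p => (toLex (-p.1, p.2) : Lex (Int × Int))) false) 0).getD (0, 0) = (xs[kH], (kH : Int)) := by
    apply headD_sorted_eq_min negKey_injective (0, 0) (pair_mem_pairsB hHlt)
    intro p hp
    obtain ⟨k, hk, rfl⟩ := mem_pairsB_elim hp
    rw [Prod.Lex.toLex_le_toLex]
    have h1 : xs[k] ≤ Mf xs := mem_le_Mf hne _ (List.getElem_mem hk)
    rcases eq_or_lt_of_le h1 with heq | hlt
    · refine Or.inr ⟨by rw [hHval, heq], ?_⟩
      have hkk : kH ≤ k := by
        by_contra hc
        exact hHmin k (by omega) heq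
      simpa using hkk
    · exact Or.inl (by simp only []; rw [hHval]; omega)
  simp only [extremesB, hlo, hhi, hiH, hiL, hHval, hLval]

-- literal-merging helpers for the summary string (label interpolation in B's f-string)
theorem mergeHiPy (X : String) : X ++ "\n\n" ++ "Highest Python Score: " = X ++ "\n\nHighest Python Score: " := by
  simp [String.append_assoc]
theorem mergeHiDS (X : String) : X ++ "\n\n" ++ "Highest Data Science Score: " = X ++ "\n\nHighest Data Science Score: " := by
  simp [String.append_assoc]
theorem mergeHiDT (X : String) : X ++ "\n\n" ++ "Highest Design Thinking Score: " = X ++ "\n\nHighest Design Thinking Score: " := by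
  simp [String.append_assoc]
theorem mergeLoJ (X : String) : X ++ "\nLowest " ++ "Java" ++ " Score: " = X ++ "\nLowest Java Score: " := by
  simp [String.append_assoc]
theorem mergeLoPy (X : String) : X ++ "\nLowest " ++ "Python" ++ " Score: " = X ++ "\nLowest Python Score: " := by
  simp [String.append_assoc]
theorem mergeLoDS (X : String) : X ++ "\nLowest " ++ "Data Science" ++ " Score: " = X ++ "\nLowest Data Science Score: " := by
  simp [String.append_assoc]
theorem mergeLoDT (X : String) : X ++ "\nLowest " ++ "Design Thinking" ++ " Score: " = X ++ "\nLowest Design Thinking Score: " := by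
  simp [String.append_assoc]

set_option maxHeartbeats 1000000 in
theorem get_grades_spec : Claim_equal_get_grades := by
  intro names j_scores py_scores ds_scores dt_scores _ hpre
  obtain ⟨hn, hj, hp, hd, ht⟩ := hpre
  simp only [Spec_get_grades, get_grades, get_grades_alt]
  rw [foldA_spec j_scores, foldA_spec py_scores, foldA_spec ds_scores, foldA_spec dt_scores]
  simp only [blockB, extremesB_spec j_scores hj.1, extremesB_spec py_scores hp.1,
    extremesB_spec ds_scores hd.1, extremesB_spec dt_scores ht.1]
  simp only [PySem.List.enumerate_eq_map_pyRange names "", List.map_map]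
  simp [← String.append_assoc, iH, iL, mergeHiPy, mergeHiDS, mergeHiDT,
        mergeLoJ, mergeLoPy, mergeLoDS, mergeLoDT]
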